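-- pv_equiv track=rewrite | github.com/alex-koe/openPMD-converter-GDF | hdf_to_gdf.py | files_from_args
-- ===== SOURCE A (Python) =====
-- def files_from_args(file_names):
--     gdf_file = ''
--     hdf_file = ''
--     for arg in file_names:
--         if arg[-4:] == '.gdf':
--             gdf_file = arg
--         elif arg[-3:] == '.h5':
--
--             hdf_file = arg
--     return gdf_file, hdf_file
-- ===== SOURCE B (Python) =====
-- def files_from_args(file_names):
--     items = list(file_names)
--     gdf_file = next((a for a in reversed(items) if a[-4:] == '.gdf'), '')
--     hdf_file = next((a for a in reversed(items) if a[-3:] == '.h5'), '')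
--     return gdf_file, hdf_file
-- ===== Notes on version B (the rewrite author's own statement) =====
-- stated objective: idiomatic
-- what changed: Replaces the single forward pass that mutates two accumulators with two independent early-stopping reverse searches (next over reversed(items)) that each find the last matching filename directly.
import Mathlib
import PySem

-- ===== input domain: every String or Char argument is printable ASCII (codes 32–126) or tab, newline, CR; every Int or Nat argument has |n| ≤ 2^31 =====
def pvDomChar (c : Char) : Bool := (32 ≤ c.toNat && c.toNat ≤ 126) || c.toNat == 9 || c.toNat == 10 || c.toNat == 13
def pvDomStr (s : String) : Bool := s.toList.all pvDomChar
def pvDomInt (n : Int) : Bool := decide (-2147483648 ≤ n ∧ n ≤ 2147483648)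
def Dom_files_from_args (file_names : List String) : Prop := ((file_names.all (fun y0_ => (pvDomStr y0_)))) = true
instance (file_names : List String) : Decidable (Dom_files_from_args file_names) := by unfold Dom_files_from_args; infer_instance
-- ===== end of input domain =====

-- B replaces A's single mutating forward pass by two independent early-stopping
-- reverse searches for the last '.gdf' / '.h5' argument (more idiomatic, same cost).

-- ===== PORT A =====
def files_from_args (file_names : List String) : String × String :=
  file_names.foldl
    (fun st arg =>
      if PySem.Str.slice arg (some (-4)) none == ".gdf" then (arg, st.2)
      else if PySem.Str.slice arg (some (-3)) none == ".h5" then (st.1, arg)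
      else st)
    ("", "")

-- ===== PORT B =====
def isGdf (a : String) : Bool := PySem.Str.slice a (some (-4)) none == ".gdf"
def isH5 (a : String) : Bool := PySem.Str.slice a (some (-3)) none == ".h5"
def files_from_args_alt (file_names : List String) : String × String :=
  let items := file_names
  ((items.reverse.find? isGdf).getD "", (items.reverse.find? isH5).getD "")

-- ===== PRECONDITION & SPEC =====
def Spec_files_from_args (file_names : List String) (out : String × String) : Prop := out = files_from_args_alt file_names
instance (file_names : List String) (out : String × String) : Decidable (Spec_files_from_args file_names out) := by unfold Spec_files_from_args; infer_instance

-- ===== CLAIM (what is proved, stated in full; the proofs are below) =====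
def Claim_equal_files_from_args : Prop := ∀ (file_names : List String), Dom_files_from_args file_names → Spec_files_from_args file_names (files_from_args file_names)

-- ===== LEMMAS AND PROOFS =====

-- a string ending in '.gdf' does not end in '.h5' (its last three chars are 'gdf')
theorem not_isH5_of_isGdf (a : String) (h : isGdf a = true) : isH5 a = false := by
  unfold isGdf at h
  unfold isH5
  rw [beq_iff_eq] at h
  have h1' := congrArg String.toList h
  rw [PySem.Str.toList_slice, PySem.Chars.slice_eq_listSlice,
      PySem.List.slice_from_neg_ofNat a.toList 4 (by omega)] at h1'
  have hgdf : (".gdf" : String).toList = ['.', 'g', 'd', 'f'] := by decide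
  rw [hgdf] at h1'
  have hn : 4 ≤ a.toList.length := by
    have hlen : a.toList.length - (a.toList.length - 4) = 4 := by
      have := congrArg List.length h1'
      rwa [List.length_drop] at this
    omega
  apply beq_eq_false_iff_ne.mpr
  intro hc
  have h2' := congrArg String.toList hc
  rw [PySem.Str.toList_slice, PySem.Chars.slice_eq_listSlice,
      PySem.List.slice_from_neg_ofNat a.toList 3 (by omega)] at h2'
  have hdd : a.toList.drop (a.toList.length - 3) = (a.toList.drop (a.toList.length - 4)).drop 1 := by
    rw [List.drop_drop]; congr 1; omega
  rw [hdd, h1'] at h2'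
  simp at h2'

theorem files_from_args_fold (l : List String) (g h : String) :
    l.foldl
      (fun st arg =>
        if PySem.Str.slice arg (some (-4)) none == ".gdf" then (arg, st.2)
        else if PySem.Str.slice arg (some (-3)) none == ".h5" then (st.1, arg)
        else st)
      (g, h)
    = ((l.reverse.find? isGdf).getD g, (l.reverse.find? isH5).getD h) := by
  induction l generalizing g h with
  | nil => rfl
  | cons a l ih =>
    rw [List.foldl_cons, List.reverse_cons, List.find?_append, List.find?_append,
        Option.getD_or, Option.getD_or]
    rcases hg : isGdf a with _ | _
    · have hgb : (PySem.Str.slice a (some (-4)) none == ".gdf") = false := hg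
      rcases h5 : isH5 a with _ | _
      · have h5b : (PySem.Str.slice a (some (-3)) none == ".h5") = false := h5
        simp only [List.find?_singleton, hg, h5, hgb, h5b, Bool.false_eq_true, if_false,
          Option.getD_none]
        exact ih g h
      · have h5b : (PySem.Str.slice a (some (-3)) none == ".h5") = true := h5
        simp only [List.find?_singleton, hg, h5, hgb, h5b, Bool.false_eq_true, if_false,
          if_true, Option.getD_none, Option.getD_some]
        exact ih g a
    · have hgb : (PySem.Str.slice a (some (-4)) none == ".gdf") = true := hg
      have h5 := not_isH5_of_isGdf a hg
      simp only [List.find?_singleton, hg, h5, hgb, Bool.false_eq_true, if_false, if_true,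
        Option.getD_none, Option.getD_some]
      exact ih a h

-- ===== VERDICT (by name: the statement is the Claim_ definition above) =====
theorem files_from_args_spec : Claim_equal_files_from_args := by
  intro file_names _
  unfold Spec_files_from_args files_from_args files_from_args_alt
  exact files_from_args_fold file_names "" ""
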